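-- pv_equiv track=rewrite | github.com/hugojry/aoc | 2023/thirteen.py | find_symmetry
-- ===== SOURCE A (Python) =====
-- def find_symmetry(puzzle, existing=None):
--     for i in range(len(puzzle) - 1):
--         j = i
--         k = i + 1
--         match = True
--         while j >= 0 and k < len(puzzle):
--             if puzzle[j] != puzzle[k]:
--                 match = False
--                 break
--
--             j -= 1
--             k += 1
--
--         if match:
--             if i != existing:
--                 return i
-- ===== SOURCE B (Python) =====
-- def find_symmetry(puzzle, existing=None):
--     # One forward pass over the rows, maintaining the set of still-alive mirror
--     # candidate centers; a center i stays alive while each new row k matches its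
--     # reflection 2*i+1-k (or the reflection has already run off the top edge).
--     n = len(puzzle)
--     alive = []
--     for k in range(1, n):
--         alive.append(k - 1)
--         alive = [i for i in alive
--                  if 2 * i + 1 - k < 0 or puzzle[2 * i + 1 - k] == puzzle[k]]
--     for i in alive:
--         if i != existing:
--             return i
-- ===== Notes on version B (the rewrite author's own statement) =====
-- stated objective: alternative
-- what changed: Instead of expanding a two-pointer mirror check outward from each candidate center, B makes a single forward pass over the rows maintaining the list of still-alive candidate centers (each new row filters out centers whose reflected row mismatches), then returns the first survivor different from existing.
import Mathlib
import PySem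

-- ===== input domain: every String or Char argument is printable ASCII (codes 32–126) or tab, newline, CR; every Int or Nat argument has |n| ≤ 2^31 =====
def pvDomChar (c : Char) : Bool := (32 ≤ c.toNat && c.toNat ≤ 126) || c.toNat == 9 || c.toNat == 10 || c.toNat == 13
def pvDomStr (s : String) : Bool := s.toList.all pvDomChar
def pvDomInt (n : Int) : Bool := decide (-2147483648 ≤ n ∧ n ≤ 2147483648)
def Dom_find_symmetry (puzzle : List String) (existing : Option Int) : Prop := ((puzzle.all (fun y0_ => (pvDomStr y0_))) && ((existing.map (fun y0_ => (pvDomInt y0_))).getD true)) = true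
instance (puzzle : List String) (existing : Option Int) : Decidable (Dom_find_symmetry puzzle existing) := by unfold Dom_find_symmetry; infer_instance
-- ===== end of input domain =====

-- B replaces A's per-center outward two-pointer expansion by a single forward
-- pass over the rows that maintains the list of still-alive candidate centers
-- (alternative decomposition; same worst-case cost).

-- ===== PORT A =====
-- the inner 'while j >= 0 and k < len(puzzle)' loop; returns the final 'match' flag
def pvMatchLoop (puzzle : List String) (j k : Int) : Bool :=
  if h : 0 ≤ j ∧ k < (puzzle.length : Int) then
    if PySem.List.pyGet? puzzle j ≠ PySem.List.pyGet? puzzle k then false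
    else pvMatchLoop puzzle (j - 1) (k + 1)
  else true
termination_by (j + 1).toNat
decreasing_by omega

-- the outer 'for i in range(len(puzzle) - 1)' loop
def pvFindLoop (puzzle : List String) (existing : Option Int) : List Int → Option Int
  | [] => none
  | i :: rest =>
    if pvMatchLoop puzzle i (i + 1) then
      if some i ≠ existing then some i else pvFindLoop puzzle existing rest
    else pvFindLoop puzzle existing rest

def find_symmetry (puzzle : List String) (existing : Option Int) : Option Int :=
  pvFindLoop puzzle existing (PySem.List.pyRange 0 ((puzzle.length : Int) - 1) 1)

-- ===== PORT B =====
-- Source B's per-row survival test: '2*i+1-k < 0 or puzzle[2*i+1-k] == puzzle[k]'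
def pvP (puzzle : List String) (i k : Int) : Bool :=
  decide (2 * i + 1 - k < 0) ||
    (PySem.List.pyGet? puzzle (2 * i + 1 - k) == PySem.List.pyGet? puzzle k)

-- Source B's 'for k in range(1, n)' loop: append center k-1, then filter the alive list
def pvPass (puzzle : List String) : List Int → List Int → List Int
  | alive, [] => alive
  | alive, k :: ks => pvPass puzzle ((alive ++ [k - 1]).filter (fun i => pvP puzzle i k)) ks

-- Source B's final 'for i in alive: if i != existing: return i'
def pvFirstDiff (existing : Option Int) : List Int → Option Int
  | [] => none
  | i :: rest => if some i ≠ existing then some i else pvFirstDiff existing rest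

def find_symmetry_alt (puzzle : List String) (existing : Option Int) : Option Int :=
  pvFirstDiff existing
    (pvPass puzzle [] (PySem.List.pyRange 1 ((puzzle.length : Int)) 1))

-- ===== PRECONDITION & SPEC =====
def Spec_find_symmetry (puzzle : List String) (existing : Option Int) (out : Option Int) : Prop := out = find_symmetry_alt puzzle existing
instance (puzzle : List String) (existing : Option Int) (out : Option Int) : Decidable (Spec_find_symmetry puzzle existing out) := by unfold Spec_find_symmetry; infer_instance

-- ===== CLAIM (what is proved, stated in full; the proofs are below) =====
def Claim_equal_find_symmetry : Prop := ∀ (puzzle : List String) (existing : Option Int), Dom_find_symmetry puzzle existing → Spec_find_symmetry puzzle existing (find_symmetry puzzle existing)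

-- ===== LEMMAS AND PROOFS =====

-- A's two-pointer loop (at mirror center i, lower pointer k) computes the same
-- boolean as checking pvP on every remaining row index k..n-1
lemma matchLoop_all (puzzle : List String) (i : Int) :
    ∀ m (k : Int), 0 ≤ k → ((puzzle.length : Int) - k).toNat ≤ m →
      pvMatchLoop puzzle (2 * i + 1 - k) k
        = (PySem.List.pyRange k (puzzle.length : Int) 1).all (fun k' => pvP puzzle i k') := by
  intro m
  induction m with
  | zero =>
    intro k hk hm
    have hkn : (puzzle.length : Int) ≤ k := by omega
    rw [pvMatchLoop]
    have hrange : PySem.List.pyRange k (puzzle.length : Int) 1 = [] := by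
      simp [PySem.List.pyRange]; omega
    simp [hrange]
    omega
  | succ m ih =>
    intro k hk hm
    rw [pvMatchLoop]
    by_cases h : 0 ≤ 2 * i + 1 - k ∧ k < (puzzle.length : Int)
    · rw [dif_pos h]
      have hcons := PySem.List.pyRange_one_cons (a := k) (b := (puzzle.length : Int)) h.2
      rw [hcons, List.all_cons]
      by_cases hne : PySem.List.pyGet? puzzle (2 * i + 1 - k) ≠ PySem.List.pyGet? puzzle k
      · have hP : pvP puzzle i k = false := by
          simp [pvP]
          exact ⟨by omega, hne⟩
        simp [hne, hP]
      · have heq : PySem.List.pyGet? puzzle (2 * i + 1 - k) = PySem.List.pyGet? puzzle k :=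
          not_not.mp hne
        have hP : pvP puzzle i k = true := by simp [pvP, heq]
        have harg : 2 * i + 1 - k - 1 = 2 * i + 1 - (k + 1) := by ring
        rw [if_neg (by simpa using heq), harg,
          ih (k + 1) (by omega) (by omega), hP]
        simp
    · rw [dif_neg h]
      by_cases hkn : k < (puzzle.length : Int)
      · -- then 2*i+1-k < 0: every later row passes the guard
        have hj : 2 * i + 1 - k < 0 := by omega
        symm
        rw [List.all_eq_true]
        intro k' hk'
        have hmem := (PySem.List.mem_pyRange_one).mp hk'
        simp [pvP]
        left; omega
      · have hrange : PySem.List.pyRange k (puzzle.length : Int) 1 = [] := by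
          simp [PySem.List.pyRange]; omega
        simp [hrange]

-- running the pass from an arbitrary alive list: the old candidates are filtered
-- by all remaining rows, independently of the new ones
lemma pass_split (puzzle : List String) :
    ∀ (ks alive : List Int),
      pvPass puzzle alive ks
        = alive.filter (fun i => ks.all (fun k => pvP puzzle i k)) ++ pvPass puzzle [] ks := by
  intro ks
  induction ks with
  | nil => intro alive; simp [pvPass]
  | cons k ks ih =>
    intro alive
    have h2 : pvPass puzzle [] (k :: ks)
        = [k - 1].filter
            (fun i => ks.all (fun k' => pvP puzzle i k') && pvP puzzle i k)
            ++ pvPass puzzle [] ks := by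
      show pvPass puzzle (([] ++ [k - 1]).filter (fun i => pvP puzzle i k)) ks = _
      rw [ih]
      simp [List.filter_filter]
    show pvPass puzzle ((alive ++ [k - 1]).filter (fun i => pvP puzzle i k)) ks = _
    rw [ih, h2]
    simp only [List.filter_append, List.filter_filter, List.append_assoc, List.all_cons]
    congr 1
    exact List.filter_congr (fun x _ => by rw [Bool.and_comm])

-- the whole pass over rows a..n-1 yields the centers a-1..n-2 that survive all
-- their own later rows
lemma pass_closed (puzzle : List String) :
    ∀ m (a : Int), 1 ≤ a → ((puzzle.length : Int) - a).toNat ≤ m →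
      pvPass puzzle [] (PySem.List.pyRange a (puzzle.length : Int) 1)
        = (PySem.List.pyRange (a - 1) ((puzzle.length : Int) - 1) 1).filter
            (fun i => (PySem.List.pyRange (i + 1) (puzzle.length : Int) 1).all
              (fun k => pvP puzzle i k)) := by
  intro m
  induction m with
  | zero =>
    intro a ha hm
    have h1 : PySem.List.pyRange a (puzzle.length : Int) 1 = [] := by
      simp [PySem.List.pyRange]; omega
    have h2 : PySem.List.pyRange (a - 1) ((puzzle.length : Int) - 1) 1 = [] := by
      simp [PySem.List.pyRange]; omega
    rw [h1, h2]; rfl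
  | succ m ih =>
    intro a ha hm
    by_cases hlt : a < (puzzle.length : Int)
    · rw [PySem.List.pyRange_one_cons hlt]
      show pvPass puzzle (([] ++ [a - 1]).filter (fun i => pvP puzzle i a)) _ = _
      rw [pass_split, ih (a + 1) (by omega) (by omega),
        PySem.List.pyRange_one_cons (a := a - 1) (b := (puzzle.length : Int) - 1) (by omega)]
      have hstep : (a - 1 + 1) = a := by omega
      have hq := PySem.List.pyRange_one_cons (a := a) (b := (puzzle.length : Int)) hlt
      have hn : a + 1 - 1 = a := by omega
      by_cases hp : pvP puzzle (a - 1) a = true <;>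
        by_cases hqq : ((PySem.List.pyRange (a + 1) (puzzle.length : Int) 1).all
            (fun k => pvP puzzle (a - 1) k)) = true <;>
        simp [List.filter, hstep, hn, hq, hp, hqq]
    · have h1 : PySem.List.pyRange a (puzzle.length : Int) 1 = [] := by
        simp [PySem.List.pyRange]; omega
      have h2 : PySem.List.pyRange (a - 1) ((puzzle.length : Int) - 1) 1 = [] := by
        simp [PySem.List.pyRange]; omega
      rw [h1, h2]; rfl

-- A's outer scan = first-different over the filtered candidate list
lemma findLoop_filter (puzzle : List String) (existing : Option Int) :
    ∀ l : List Int,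
      pvFindLoop puzzle existing l
        = pvFirstDiff existing (l.filter (fun i => pvMatchLoop puzzle i (i + 1))) := by
  intro l
  induction l with
  | nil => rfl
  | cons i rest ih =>
    show (if pvMatchLoop puzzle i (i + 1) then _ else _) = _
    rw [List.filter_cons]
    by_cases hm : pvMatchLoop puzzle i (i + 1) = true
    · rw [if_pos hm, if_pos hm]
      show _ = pvFirstDiff existing (i :: _)
      by_cases he : some i ≠ existing
      · simp [pvFirstDiff, he]
      · simp [pvFirstDiff, he, ih]
    · rw [if_neg hm, if_neg (by simpa using hm), ih]

-- ===== VERDICT (by name: the statement is the Claim_ definition above) =====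
theorem find_symmetry_spec : Claim_equal_find_symmetry := by
  intro puzzle existing _
  show find_symmetry puzzle existing = find_symmetry_alt puzzle existing
  unfold find_symmetry find_symmetry_alt
  rw [findLoop_filter,
    pass_closed puzzle ((puzzle.length : Int) - 1 + 1).toNat 1 le_rfl (by omega)]
  congr 1
  have h0 : (1 : Int) - 1 = 0 := by norm_num
  rw [h0]
  refine List.filter_congr (fun i hi => ?_)
  have hmem := (PySem.List.mem_pyRange_one).mp hi
  have harg : i = 2 * i + 1 - (i + 1) := by ring
  calc pvMatchLoop puzzle i (i + 1)
      = pvMatchLoop puzzle (2 * i + 1 - (i + 1)) (i + 1) := by rw [← harg]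
    _ = _ := matchLoop_all puzzle i ((puzzle.length : Int) - (i + 1)).toNat (i + 1)
        (by omega) le_rfl
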